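-- pv_equiv track=rewrite | github.com/qihuizzz/sec-xbrl-automated-financial-analysis-reports | report.py | _render_two_col_images
-- ===== SOURCE A (Python) =====
-- from typing import Dict, List, Optional, Tuple
--
-- def _render_two_col_images(items: List[Tuple[str, str]]) -> str:
--     lines: List[str] = []
--     lines.append("| | |")
--     lines.append("|---|---|")
--
--     i = 0
--     while i < len(items):
--         left_title, left_path = items[i]
--         left_cell = f"<b>{left_title}</b><br><img src='{left_path}' width='100%'>"
--
--         if i + 1 < len(items):
--             right_title, right_path = items[i + 1]
--             right_cell = f"<b>{right_title}</b><br><img src='{right_path}' width='100%'>"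
--         else:
--             right_cell = ""
--
--         lines.append(f"| {left_cell} | {right_cell} |")
--         i += 2
--
--     return "\n".join(lines)
-- ===== SOURCE B (Python) =====
-- def _render_two_col_images(items):
--     def _rows(cells):
--         if not cells:
--             return []
--         return [f"| {cells[0]} | {cells[1]} |"] + _rows(cells[2:])
--
--     cells = [f"<b>{t}</b><br><img src='{p}' width='100%'>" for t, p in items]
--     if len(cells) % 2 == 1:
--         cells.append("")
--     return "\n".join(["| | |", "|---|---|"] + _rows(cells))
-- ===== Notes on version B (the rewrite author's own statement) =====
-- stated objective: alternative
-- what changed: A interleaves cell formatting and row emission in one stride-2 index while-loop; B first formats every cell in one map pass, pads the cell list to even length with an empty cell, then pairs consecutive cells into rows by structural recursion.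
import Mathlib
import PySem

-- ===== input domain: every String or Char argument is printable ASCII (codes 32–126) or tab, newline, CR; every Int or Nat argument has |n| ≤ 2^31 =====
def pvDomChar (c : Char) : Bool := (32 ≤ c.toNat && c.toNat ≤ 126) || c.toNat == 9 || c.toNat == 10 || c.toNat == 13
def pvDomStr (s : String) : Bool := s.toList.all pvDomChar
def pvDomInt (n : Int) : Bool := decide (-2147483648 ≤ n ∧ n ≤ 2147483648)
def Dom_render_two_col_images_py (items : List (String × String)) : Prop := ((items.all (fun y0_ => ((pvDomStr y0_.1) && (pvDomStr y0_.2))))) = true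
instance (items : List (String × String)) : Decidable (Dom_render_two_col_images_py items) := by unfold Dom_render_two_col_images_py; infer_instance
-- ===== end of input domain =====

-- B splits A's single stride-2 while-loop into a map pass that formats all cells, an even-length pad, and a recursive pairing pass (alternative decomposition, same cost).


-- ===== PORT A =====
-- A's while-loop over index i (i += 2): recursion consuming the remaining items,
-- looking at the head as items[i] and the next element as items[i+1].
def pvLoopA : List (String × String) → List String
  | [] => []
  | (lt, lp) :: rest =>
    let left_cell := "<b>" ++ lt ++ "</b><br><img src='" ++ lp ++ "' width='100%'>"
    let right_cell :=
      match rest with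
      | (rt, rp) :: _ => "<b>" ++ rt ++ "</b><br><img src='" ++ rp ++ "' width='100%'>"
      | [] => ""
    ("| " ++ left_cell ++ " | " ++ right_cell ++ " |") :: pvLoopA (rest.drop 1)
  termination_by items => items.length
  decreasing_by simp

def render_two_col_images_py (items : List (String × String)) : String :=
  PySem.Str.join "\n" ("| | |" :: "|---|---|" :: pvLoopA items)

-- ===== PORT B =====
-- B's recursive helper _rows: pairs consecutive cells; the single-cell case is
-- unreachable from the entry point (cells are padded to even length first).
def pvRowsB : List String → List String
  | [] => []
  | [c] => ["| " ++ c ++ " |"]  -- unreachable after padding (Python would raise IndexError)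
  | c0 :: c1 :: rest => ("| " ++ c0 ++ " | " ++ c1 ++ " |") :: pvRowsB rest

def render_two_col_images_py_alt (items : List (String × String)) : String :=
  let cells := items.map (fun tp => "<b>" ++ tp.1 ++ "</b><br><img src='" ++ tp.2 ++ "' width='100%'>")
  let cells := if cells.length % 2 == 1 then cells ++ [""] else cells
  PySem.Str.join "\n" (["| | |", "|---|---|"] ++ pvRowsB cells)

-- ===== PRECONDITION & SPEC =====
def Spec_render_two_col_images_py (items : List (String × String)) (out : String) : Prop := out = render_two_col_images_py_alt items
instance (items : List (String × String)) (out : String) : Decidable (Spec_render_two_col_images_py items out) := by unfold Spec_render_two_col_images_py; infer_instance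

-- ===== CLAIM (what is proved, stated in full; the proofs are below) =====
def Claim_equal_render_two_col_images_py : Prop := ∀ (items : List (String × String)), Dom_render_two_col_images_py items → Spec_render_two_col_images_py items (render_two_col_images_py items)

-- ===== LEMMAS AND PROOFS =====

def pvCell (tp : String × String) : String :=
  "<b>" ++ tp.1 ++ "</b><br><img src='" ++ tp.2 ++ "' width='100%'>"

def pvPad (cells : List String) : List String :=
  if cells.length % 2 == 1 then cells ++ [""] else cells

theorem pvPad_cons_cons (a b : String) (cs : List String) :
    pvPad (a :: b :: cs) = a :: b :: pvPad cs := by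
  simp only [pvPad, List.length_cons]
  have h : (cs.length + 1 + 1) % 2 = cs.length % 2 := by omega
  simp only [h]
  split <;> rfl

theorem pvLoopA_eq_rows : ∀ (items : List (String × String)),
    pvLoopA items = pvRowsB (pvPad (items.map pvCell))
  | [] => by simp [pvLoopA.eq_def, pvPad, pvRowsB]
  | [(lt, lp)] => by simp [pvLoopA.eq_def, pvPad, pvRowsB, pvCell]
  | (lt, lp) :: (rt, rp) :: rest => by
      have ih := pvLoopA_eq_rows rest
      simp only [List.map_cons, pvPad_cons_cons, pvRowsB]
      rw [pvLoopA.eq_def]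
      simp [pvCell, ih]

-- ===== VERDICT (by name: the statement is the Claim_ definition above) =====
theorem render_two_col_images_py_spec : Claim_equal_render_two_col_images_py := by
  intro items _
  unfold Spec_render_two_col_images_py render_two_col_images_py render_two_col_images_py_alt
  rw [pvLoopA_eq_rows]
  rfl
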